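-- pv_equiv track=rewrite | github.com/dvrx47/sztuczna_inteligencja | P1/z1/funkcje.py | black_correct
-- ===== SOURCE A (Python) =====
-- def black_correct( turn ):
--     if turn[3][0] == turn[2][0] or turn[3][1] == turn[2][1]:
--         return False
--
--     min_l = ord('a')
--     max_l = ord('h')
--
--     current_letter = ord( turn[1][0])
--     current_index = int(turn[1][1])
--
--     letters = [chr(x) for x in range(current_letter-1, current_letter+2 ) if min_l <= x <= max_l ]
--     indexes = [str(x) for x in range(current_index-1, current_index+2) if 1 <= x <= 8 ]
--
--     white_king_range = [l+i for l in letters for i in indexes]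
--
--     if turn[3] in white_king_range:
--         return False
--     return True
-- ===== SOURCE B (Python) =====
-- def black_correct(turn):
--     # Same check as the original, but the 3x3 neighbourhood of the white king
--     # is tested by a closed-form Chebyshev-distance comparison instead of
--     # generating the list of neighbour squares and scanning it.
--     if turn[3][0] == turn[2][0] or turn[3][1] == turn[2][1]:
--         return False
--     k = int(turn[1][1])
--     dest = turn[3]
--     if len(dest) == 2:
--         c, d = dest[0], dest[1]
--         if 'a' <= c <= 'h' and abs(ord(c) - ord(turn[1][0])) <= 1 \
--            and '1' <= d <= '8' and abs(int(d) - k) <= 1: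
--             return False
--     return True
-- ===== Notes on version B (the rewrite author's own statement) =====
-- stated objective: simpler
-- what changed: Replaces building the list of all neighbour squares of the white king (two filtered ranges, a cartesian-product list, then a membership scan) with a direct closed-form adjacency test: destination is rejected iff it is a 2-character on-board square within Chebyshev distance 1 of the white king.
import Mathlib
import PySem

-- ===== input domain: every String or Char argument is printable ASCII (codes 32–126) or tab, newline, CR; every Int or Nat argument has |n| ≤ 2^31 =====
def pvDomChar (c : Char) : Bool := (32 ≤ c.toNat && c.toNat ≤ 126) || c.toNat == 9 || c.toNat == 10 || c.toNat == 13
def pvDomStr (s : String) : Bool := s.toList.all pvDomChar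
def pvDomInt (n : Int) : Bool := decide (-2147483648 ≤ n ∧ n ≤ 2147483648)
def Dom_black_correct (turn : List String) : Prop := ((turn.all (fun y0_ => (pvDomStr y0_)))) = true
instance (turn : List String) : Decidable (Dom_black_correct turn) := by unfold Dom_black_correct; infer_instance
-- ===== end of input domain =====

-- B replaces A's generate-all-neighbour-squares-and-scan check by a closed-form
-- Chebyshev-distance adjacency test (objective: simpler).

-- ===== PORT A =====
def black_correct (turn : List String) : Bool :=
  let t1 := (turn.getD 1 "").toList
  let t2 := (turn.getD 2 "").toList
  let t3 := (turn.getD 3 "").toList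
  if t3.getD 0 ' ' == t2.getD 0 ' ' || t3.getD 1 ' ' == t2.getD 1 ' ' then false
  else
    let min_l : Int := 97
    let max_l : Int := 104
    let current_letter : Int := (t1.getD 0 ' ').toNat
    let current_index : Int := (PySem.Int.ofChars? [t1.getD 1 ' ']).getD 0
    let letters : List Char :=
      ((PySem.List.pyRange (current_letter - 1) (current_letter + 2) 1).filter
        (fun x => decide (min_l ≤ x) && decide (x ≤ max_l))).map (fun x => Char.ofNat x.toNat)
    let indexes : List (List Char) :=
      ((PySem.List.pyRange (current_index - 1) (current_index + 2) 1).filter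
        (fun x => decide (1 ≤ x) && decide (x ≤ 8))).map (fun x => (PySem.Int.toStr x).toList)
    let white_king_range : List (List Char) := letters.flatMap (fun l => indexes.map (fun i => l :: i))
    if white_king_range.contains t3 then false else true

-- ===== PORT B =====
def black_correct_alt (turn : List String) : Bool :=
  let t1 := (turn.getD 1 "").toList
  let t2 := (turn.getD 2 "").toList
  let t3 := (turn.getD 3 "").toList
  if t3.getD 0 ' ' == t2.getD 0 ' ' || t3.getD 1 ' ' == t2.getD 1 ' ' then false
  else
    let k : Int := (PySem.Int.ofChars? [t1.getD 1 ' ']).getD 0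
    if t3.length = 2 then
      let c := t3.getD 0 ' '
      let d := t3.getD 1 ' '
      if ('a' ≤ c ∧ c ≤ 'h') ∧ ((c.toNat : Int) - ((t1.getD 0 ' ').toNat : Int)).natAbs ≤ 1
          ∧ ('1' ≤ d ∧ d ≤ '8') ∧ ((PySem.Int.ofChars? [d]).getD 0 - k).natAbs ≤ 1
      then false else true
    else true

-- ===== PRECONDITION & SPEC =====
-- Pre_ = exactly the inputs where Python A returns: the list has indices 1..3, the first
-- guard's string indexing is in range, and (when the guard falls through) turn[1] has a
-- digit at index 1 so that int(turn[1][1]) succeeds.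
def Pre_black_correct (turn : List String) : Prop :=
  4 ≤ turn.length ∧
  (turn.getD 2 "").toList ≠ [] ∧ (turn.getD 3 "").toList ≠ [] ∧
  ((turn.getD 3 "").toList.getD 0 ' ' = (turn.getD 2 "").toList.getD 0 ' ' ∨
   (2 ≤ (turn.getD 2 "").toList.length ∧ 2 ≤ (turn.getD 3 "").toList.length ∧
    ((turn.getD 3 "").toList.getD 1 ' ' = (turn.getD 2 "").toList.getD 1 ' ' ∨
     ((turn.getD 1 "").toList.getD 1 ' ').isDigit = true)))
instance (turn : List String) : Decidable (Pre_black_correct turn) := by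
  unfold Pre_black_correct; infer_instance

def pvWitness_black_correct : List String := ["e2e4", "e1", "a8", "b5"]

def Spec_black_correct (turn : List String) (out : Bool) : Prop := out = black_correct_alt turn
instance (turn : List String) (out : Bool) : Decidable (Spec_black_correct turn out) := by
  unfold Spec_black_correct; infer_instance

-- ===== CLAIM (what is proved, stated in full; the proofs are below) =====
def Claim_equal_black_correct : Prop := ∀ (turn : List String), Dom_black_correct turn → Pre_black_correct turn → Spec_black_correct turn (black_correct turn)

-- ===== LEMMAS AND PROOFS =====
theorem char_eq_of_toNat (c d : Char) (h : c.toNat = d.toNat) : c = d :=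
  Char.ext (UInt32.toNat_inj.mp h)
theorem toNat_ofNat_small (n : Nat) (h : n < 55296) : (Char.ofNat n).toNat = n := by
  rw [Char.toNat_ofNat]; simp [Nat.isValidChar]; omega
theorem char_le_iff (c d : Char) : (c ≤ d) ↔ c.toNat ≤ d.toNat := by
  rw [Char.le_def]; exact ge_iff_le
theorem digit_bounds (c : Char) (h : c.isDigit = true) : 48 ≤ c.toNat ∧ c.toNat ≤ 57 := by
  simp only [Char.isDigit, decide_eq_true_eq, Bool.and_eq_true] at h
  obtain ⟨h1, h2⟩ := h
  exact ⟨UInt32.le_iff_toNat_le.mp h1, UInt32.le_iff_toNat_le.mp h2⟩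
theorem ofChars_digit (d : Char) (h : 48 ≤ d.toNat) (h2 : d.toNat ≤ 57) :
    PySem.Int.ofChars? [d] = some ((d.toNat : Int) - 48) := by
  have hd : d = Char.ofNat d.toNat :=
    char_eq_of_toNat _ _ (toNat_ofNat_small _ (by omega)).symm
  have hv : d.toNat = 48 ∨ d.toNat = 49 ∨ d.toNat = 50 ∨ d.toNat = 51 ∨ d.toNat = 52 ∨
      d.toNat = 53 ∨ d.toNat = 54 ∨ d.toNat = 55 ∨ d.toNat = 56 ∨ d.toNat = 57 := by omega
  rcases hv with h'|h'|h'|h'|h'|h'|h'|h'|h'|h' <;> (rw [h'] at hd; subst hd; decide)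
theorem toStr_digit (x : Int) (h1 : 1 ≤ x) (h2 : x ≤ 8) :
    (PySem.Int.toStr x).toList = [Char.ofNat (48 + x.toNat)] := by
  interval_cases x <;> decide
theorem range3 (a : Int) : PySem.List.pyRange (a - 1) (a + 2) 1 = [a - 1, a, a + 1] := by
  rw [PySem.List.pyRange_one_cons (by omega), PySem.List.pyRange_one_cons (by omega),
      PySem.List.pyRange_one_cons (by omega), PySem.List.pyRange_one_eq_nil (by omega)]
  norm_num

theorem core (t1 t3 : List Char)
    (hdig : (t1.getD 1 ' ').isDigit = true) :
    (letI cl : Int := (t1.getD 0 ' ').toNat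
     letI ci : Int := (PySem.Int.ofChars? [t1.getD 1 ' ']).getD 0
     (if (((PySem.List.pyRange (cl - 1) (cl + 2) 1).filter
            (fun x => decide ((97:Int) ≤ x) && decide (x ≤ (104:Int)))).map
            (fun x => Char.ofNat x.toNat)).flatMap
          (fun l => (((PySem.List.pyRange (ci - 1) (ci + 2) 1).filter
            (fun x => decide ((1:Int) ≤ x) && decide (x ≤ (8:Int)))).map
            (fun x => (PySem.Int.toStr x).toList)).map (fun i => l :: i)) |>.contains t3
      then false else true) =
     (if t3.length = 2 then
        if ('a' ≤ t3.getD 0 ' ' ∧ t3.getD 0 ' ' ≤ 'h') ∧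
            (((t3.getD 0 ' ').toNat : Int) - ((t1.getD 0 ' ').toNat : Int)).natAbs ≤ 1
            ∧ ('1' ≤ t3.getD 1 ' ' ∧ t3.getD 1 ' ' ≤ '8') ∧
            ((PySem.Int.ofChars? [t3.getD 1 ' ']).getD 0 - ci).natAbs ≤ 1
        then false else true
      else true)) := by
  obtain ⟨hb1, hb2⟩ := digit_bounds _ hdig
  set d1 := t1.getD 1 ' ' with hd1
  set c0 := t1.getD 0 ' ' with hc0
  have hci : (PySem.Int.ofChars? [d1]).getD 0 = (d1.toNat : Int) - 48 := by
    rw [ofChars_digit _ hb1 hb2]; rfl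
  rw [hci, range3, range3]
  have hmem : ∀ s : List Char,
      (s ∈ ((([(c0.toNat : Int) - 1, (c0.toNat : Int), (c0.toNat : Int) + 1].filter
            (fun x => decide ((97:Int) ≤ x) && decide (x ≤ (104:Int)))).map
            (fun x : Int => Char.ofNat x.toNat)).flatMap
          (fun l => ((([( (d1.toNat : Int) - 48) - 1, ((d1.toNat : Int) - 48),
                      ((d1.toNat : Int) - 48) + 1].filter
            (fun x => decide ((1:Int) ≤ x) && decide (x ≤ (8:Int)))).map
            (fun x : Int => (PySem.Int.toStr x).toList)).map (fun i => l :: i))))) ↔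
      (∃ x y : Int,
        (x = (c0.toNat : Int) - 1 ∨ x = (c0.toNat : Int) ∨ x = (c0.toNat : Int) + 1) ∧
        97 ≤ x ∧ x ≤ 104 ∧
        (y = ((d1.toNat : Int) - 48) - 1 ∨ y = ((d1.toNat : Int) - 48) ∨
         y = ((d1.toNat : Int) - 48) + 1) ∧ 1 ≤ y ∧ y ≤ 8 ∧
        s = [Char.ofNat x.toNat, Char.ofNat (48 + y.toNat)]) := by
    intro s
    constructor
    · intro hs
      rw [List.mem_flatMap] at hs
      obtain ⟨l, hl, hs⟩ := hs
      rw [List.mem_map] at hl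
      obtain ⟨x, hx, rfl⟩ := hl
      rw [List.mem_filter] at hx
      obtain ⟨hxm, hxb⟩ := hx
      rw [List.mem_map] at hs
      obtain ⟨i, hi, rfl⟩ := hs
      rw [List.mem_map] at hi
      obtain ⟨y, hy, rfl⟩ := hi
      rw [List.mem_filter] at hy
      obtain ⟨hym, hyb⟩ := hy
      simp only [Bool.and_eq_true, decide_eq_true_eq] at hxb hyb
      refine ⟨x, y, ?_, hxb.1, hxb.2, ?_, hyb.1, hyb.2, ?_⟩
      · simpa using hxm
      · simpa using hym
      · rw [toStr_digit y hyb.1 hyb.2]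
    · rintro ⟨x, y, hxm, hx1, hx2, hym, hy1, hy2, rfl⟩
      rw [List.mem_flatMap]
      refine ⟨Char.ofNat x.toNat, ?_, ?_⟩
      · rw [List.mem_map]
        refine ⟨x, ?_, rfl⟩
        rw [List.mem_filter]
        refine ⟨by simpa using hxm, ?_⟩
        simp only [Bool.and_eq_true, decide_eq_true_eq]
        exact ⟨hx1, hx2⟩
      · rw [List.mem_map]
        refine ⟨[Char.ofNat (48 + y.toNat)], ?_, rfl⟩
        rw [List.mem_map]
        refine ⟨y, ?_, (toStr_digit y hy1 hy2)⟩
        rw [List.mem_filter]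
        refine ⟨by simpa using hym, ?_⟩
        simp only [Bool.and_eq_true, decide_eq_true_eq]
        exact ⟨hy1, hy2⟩
  simp only [List.contains_iff_mem]
  by_cases hL : t3.length = 2
  · obtain ⟨c, d, rfl⟩ := List.length_eq_two.mp hL
    rw [if_pos hL]
    simp only [List.getD_cons_zero, List.getD_cons_succ]
    by_cases hEx : ∃ x y : Int,
        (x = (c0.toNat : Int) - 1 ∨ x = (c0.toNat : Int) ∨ x = (c0.toNat : Int) + 1) ∧
        97 ≤ x ∧ x ≤ 104 ∧
        (y = ((d1.toNat : Int) - 48) - 1 ∨ y = ((d1.toNat : Int) - 48) ∨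
         y = ((d1.toNat : Int) - 48) + 1) ∧ 1 ≤ y ∧ y ≤ 8 ∧
        [c, d] = [Char.ofNat x.toNat, Char.ofNat (48 + y.toNat)]
    · rw [if_pos ((hmem _).mpr hEx)]
      obtain ⟨x, y, hxm, hx1, hx2, hym, hy1, hy2, heq⟩ := hEx
      have hc : c = Char.ofNat x.toNat := by injection heq
      have hdq : d = Char.ofNat (48 + y.toNat) := by
        injection heq with h1 h2; injection h2
      have hcN : (c.toNat : Int) = x := by
        rw [hc, toNat_ofNat_small _ (by omega)]; omega
      have hdN : (d.toNat : Int) = 48 + y := by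
        rw [hdq, toNat_ofNat_small _ (by omega)]; omega
      rw [if_pos]
      refine ⟨⟨?_, ?_⟩, ?_, ⟨?_, ?_⟩, ?_⟩
      · rw [char_le_iff]; change 97 ≤ c.toNat; omega
      · rw [char_le_iff]; change c.toNat ≤ 104; omega
      · omega
      · rw [char_le_iff]; change 49 ≤ d.toNat; omega
      · rw [char_le_iff]; change d.toNat ≤ 56; omega
      · show ((PySem.Int.ofChars? [d]).getD 0 - _).natAbs ≤ 1
        rw [ofChars_digit d (by omega) (by omega)]
        simp only [Option.getD_some]
        omega
    · rw [if_neg (fun hm => hEx ((hmem _).mp hm))]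
      rw [if_neg]
      · rintro ⟨⟨ha1, ha2⟩, hab, ⟨hc1, hc2⟩, hbb⟩
        rw [char_le_iff] at ha1 ha2 hc1 hc2
        change 97 ≤ c.toNat at ha1
        change c.toNat ≤ 104 at ha2
        change 49 ≤ d.toNat at hc1
        change d.toNat ≤ 56 at hc2
        rw [ofChars_digit d (by omega) (by omega)] at hbb
        simp only [Option.getD_some] at hbb
        apply hEx
        refine ⟨(c.toNat : Int), (d.toNat : Int) - 48, by omega, by omega, by omega,
          by omega, by omega, by omega, ?_⟩
        have hc' : c = Char.ofNat ((c.toNat : Int)).toNat := by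
          rw [Int.toNat_natCast]
          exact char_eq_of_toNat _ _ (toNat_ofNat_small _ (by omega)).symm
        have hd' : d = Char.ofNat (48 + ((d.toNat : Int) - 48).toNat) := by
          have h48 : 48 + ((d.toNat : Int) - 48).toNat = d.toNat := by omega
          rw [h48]
          exact char_eq_of_toNat _ _ (toNat_ofNat_small _ (by omega)).symm
        rw [← hc', ← hd']
  · rw [if_neg hL]
    rw [if_neg]
    intro hm
    obtain ⟨x, y, _, _, _, _, _, _, heq⟩ := (hmem _).mp hm
    apply hL
    rw [heq]
    rfl

-- ===== VERDICT (by name: the statement is the Claim_ definition above) =====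
theorem black_correct_spec : Claim_equal_black_correct := by
  intro turn _ hpre
  simp only [Spec_black_correct, black_correct, black_correct_alt]
  obtain ⟨hl, h2, h3, hd⟩ := hpre
  by_cases hg : ((turn.getD 3 "").toList.getD 0 ' ' == (turn.getD 2 "").toList.getD 0 ' '
      || (turn.getD 3 "").toList.getD 1 ' ' == (turn.getD 2 "").toList.getD 1 ' ') = true
  · simp only [hg, if_true]
  · simp only [hg]
    simp only [Bool.false_eq_true, if_false]
    have hg' := hg
    simp only [Bool.or_eq_true, beq_iff_eq, not_or] at hg'
    have hdd : ((turn.getD 1 "").toList.getD 1 ' ').isDigit = true := by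
      rcases hd with h | ⟨_, _, h | h⟩
      · exact absurd h hg'.1
      · exact absurd h hg'.2
      · exact h
    exact core _ _ hdd
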